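-- pv_equiv track=rewrite | github.com/cristianoc/arc-code-golf-solutions | task159.py | solve_6b9890af
-- ===== SOURCE A (Python) =====
-- TWO = 2
--
-- def _bg_color(G):
--     flat = [v for r in G for v in r]
--     return max(set(flat), key=flat.count)
--
-- def _components_nonbg_univalued_diag(G):
--     # components of non-background, single color, 8-neighborhood
--     bg = _bg_color(G)
--     h, w = len(G), len(G[0])
--     seen = [[False]*w for _ in range(h)]
--     comps = []
--     for i in range(h):
--         for j in range(w):
--             if seen[i][j] or G[i][j]==bg:
--                 continue
--             color = G[i][j]
--             q=[(i,j)]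
--             seen[i][j]=True
--             cur=[]
--             while q:
--                 a,b = q.pop()
--                 cur.append((a,b,color))
--                 for da in (-1,0,1):
--                     for db in (-1,0,1):
--                         if da==0 and db==0:
--                             continue
--                         na,nb = a+da,b+db
--                         if 0<=na<h and 0<=nb<w and not seen[na][nb] and G[na][nb]==color:
--                             seen[na][nb]=True
--                             q.append((na,nb))
--             comps.append(cur)
--     return comps
--
-- def _normalize(obj):
--     mi = min(i for i,_,_ in obj)
--     mj = min(j for _,j,_ in obj)
--     return [(i-mi, j-mj, v) for i,j,v in obj]
--
-- def _upscale(obj, k):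
--     if k == 1:
--         return list(obj)
--     out=[]
--     for i,j,v in obj:
--         for di in range(k):
--             for dj in range(k):
--                 out.append((i*k+di, j*k+dj, v))
--     return out
--
-- def solve_6b9890af(I):
--     h, w = len(I), len(I[0])
--
--     # Bounding box of all color-2 cells
--     pos2 = [(i,j) for i in range(h) for j in range(w) if I[i][j]==TWO]
--     if not pos2:
--         return tuple(tuple(r) for r in I)
--     i0 = min(i for i,_ in pos2)
--     j0 = min(j for _,j in pos2)
--     i1 = max(i for i,_ in pos2)
--     j1 = max(j for _,j in pos2)
--
--     # Crop subgrid
--     sub = [list(I[i][j0:j1+1]) for i in range(i0, i1+1)]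
--     sub_h, sub_w = len(sub), len(sub[0])
--
--     # Smallest non-bg, univalued, diag component in full I
--     comps = _components_nonbg_univalued_diag(I)
--     if not comps:
--         return tuple(tuple(r) for r in sub)
--     small = min(comps, key=lambda c: len(c))
--
--     # Scale factor from subgrid width
--     s = (sub_w) // 3
--     obj = _normalize(_upscale(small, s))
--     # shift by UNITY (1,1)
--     obj = [(i+1, j+1, v) for i,j,v in obj]
--
--     # Paint into subgrid
--     for i,j,v in obj:
--         if 0<=i<sub_h and 0<=j<sub_w:
--             sub[i][j] = v
--
--     return tuple(tuple(r) for r in sub)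
-- ===== SOURCE B (Python) =====
-- TWO = 2
--
-- def _bg_color(G):
--     counts = {}
--     for row in G:
--         for v in row:
--             counts[v] = counts.get(v, 0) + 1
--     best = None
--     best_count = 0
--     for v, c in counts.items():
--         if best is None or c > best_count:
--             best, best_count = v, c
--     return best
--
-- def _components(G, bg):
--     # components of non-background, single color, 8-neighborhood
--     h, w = len(G), len(G[0])
--     seen = [[False]*w for _ in range(h)]
--     comps = []
--     for i in range(h):
--         for j in range(w):
--             if seen[i][j] or G[i][j] == bg:
--                 continue
--             color = G[i][j]
--             q = [(i, j)]
--             seen[i][j] = True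
--             cur = []
--             while q:
--                 a, b = q.pop()
--                 cur.append((a, b, color))
--                 for da in (-1, 0, 1):
--                     for db in (-1, 0, 1):
--                         if da == 0 and db == 0:
--                             continue
--                         na, nb = a + da, b + db
--                         if 0 <= na < h and 0 <= nb < w and not seen[na][nb] and G[na][nb] == color:
--                             seen[na][nb] = True
--                             q.append((na, nb))
--             comps.append(cur)
--     return comps
--
-- def solve_6b9890af(I):
--     h, w = len(I), len(I[0])
--
--     # Bounding box of all color-2 cells in one pass
--     box = None  # (i0, i1, j0, j1)
--     for i in range(h):
--         for j in range(w):
--             if I[i][j] == TWO: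
--                 if box is None:
--                     box = (i, i, j, j)
--                 else:
--                     box = (min(box[0], i), max(box[1], i),
--                            min(box[2], j), max(box[3], j))
--     if box is None:
--         return tuple(tuple(r) for r in I)
--     i0, i1, j0, j1 = box
--
--     sub = [row[j0:j1+1] for row in I[i0:i1+1]]
--     sub_h, sub_w = len(sub), len(sub[0])
--
--     comps = _components(I, _bg_color(I))
--     if not comps:
--         return tuple(tuple(r) for r in sub)
--     small = min(comps, key=len)
--
--     mi = min(a for a, _, _ in small)
--     mj = min(b for _, b, _ in small)
--     v = small[0][2]
--     cells = {(a, b) for a, b, _ in small}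
--     s = sub_w // 3
--
--     # Per-cell gather: cell (r, c) is covered by the shifted, scaled object
--     # iff its pre-image under the scaling lies in the smallest component.
--     out = []
--     for r in range(sub_h):
--         row = []
--         for c in range(sub_w):
--             if (s >= 1 and r >= 1 and c >= 1
--                     and ((r - 1) // s + mi, (c - 1) // s + mj) in cells):
--                 row.append(v)
--             else:
--                 row.append(sub[r][c])
--         out.append(tuple(row))
--     return tuple(out)
-- ===== Notes on version B (the rewrite author's own statement) =====
-- stated objective: alternative
-- what changed: B replaces A's quadratic max(set,key=count) background pick by a single counting pass over a dict, builds the colour-2 bounding box in one fold instead of materialising the position list and scanning it four times, crops by slicing, and inverts the paint stage: instead of generating the normalize/upscale/shift triple list and scattering it into the grid, B decides each output cell directly by an integer-division pre-image test against the smallest component; the flood-fill component search is kept as a shared helper.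
import Mathlib
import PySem

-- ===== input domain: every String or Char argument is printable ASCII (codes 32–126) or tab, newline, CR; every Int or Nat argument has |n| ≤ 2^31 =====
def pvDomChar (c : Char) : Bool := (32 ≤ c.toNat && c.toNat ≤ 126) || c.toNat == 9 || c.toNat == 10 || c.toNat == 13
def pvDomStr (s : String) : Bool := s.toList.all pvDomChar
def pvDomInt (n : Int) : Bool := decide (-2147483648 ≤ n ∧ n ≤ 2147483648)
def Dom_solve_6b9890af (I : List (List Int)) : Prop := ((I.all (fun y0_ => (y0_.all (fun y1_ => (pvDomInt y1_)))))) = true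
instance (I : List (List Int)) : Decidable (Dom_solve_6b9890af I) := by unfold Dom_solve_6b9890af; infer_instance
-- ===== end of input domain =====

-- B replaces A's object pipeline by a one-pass bounding-box fold, a counting background pass and a
-- per-cell gather paint; the flood-fill component search is kept as a shared helper.

-- ===== PORT A =====
-- shared helpers (used verbatim by both Python files)

-- I[i][j] for indices produced by range loops (always 0 ≤ i < h, 0 ≤ j < w at use sites)
def pvCell (I : List (List Int)) (i j : Int) : Int :=
  PySem.List.pyGetD (PySem.List.pyGetD I i []) j 0

def pvSeenGet (seen : List (List Bool)) (a b : Int) : Bool :=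
  (seen.getD a.toNat []).getD b.toNat false

def pvSeenSet (seen : List (List Bool)) (a b : Int) : List (List Bool) :=
  seen.set a.toNat ((seen.getD a.toNat []).set b.toNat true)

-- the double 'for da in (-1,0,1): for db in (-1,0,1):' neighbour loop of one popped cell
def pvFloodStep (G : List (List Int)) (color h w : Int) (a b : Int)
    (st : List (Int × Int) × List (List Bool)) : List (Int × Int) × List (List Bool) :=
  ([-1, 0, 1] : List Int).foldl (fun st da =>
    ([-1, 0, 1] : List Int).foldl (fun st db =>
      if da = 0 ∧ db = 0 then st
      else
        let na := a + da
        let nb := b + db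
        if 0 ≤ na ∧ na < h ∧ 0 ≤ nb ∧ nb < w ∧ pvSeenGet st.2 na nb = false ∧ pvCell G na nb = color
        then ((na, nb) :: st.1, pvSeenSet st.2 na nb)
        else st) st) st

-- the 'while q:' loop; the Python stack's top (list end) is the head of the Lean list.
-- fuel: every push marks an unseen cell seen, so h*w + 1 steps always drain the stack.
def pvFlood (G : List (List Int)) (color h w : Int) :
    Nat → List (Int × Int) → List (List Bool) → List (Int × Int × Int) →
    List (List Bool) × List (Int × Int × Int)
  | 0, _, seen, cur => (seen, cur)
  | _ + 1, [], seen, cur => (seen, cur)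
  | fuel + 1, (a, b) :: q, seen, cur =>
      let cur' := cur ++ [(a, b, color)]
      let st := pvFloodStep G color h w a b (q, seen)
      pvFlood G color h w fuel st.1 st.2 cur'

-- _components_nonbg_univalued_diag, with the background colour passed in
def pvComponents (G : List (List Int)) (bg : Int) : List (List (Int × Int × Int)) :=
  let h : Int := G.length
  let w : Int := (G.headD []).length
  let seen0 : List (List Bool) := List.replicate G.length (List.replicate (G.headD []).length false)
  let fuel : Nat := G.length * (G.headD []).length + 1
  ((PySem.List.pyRange 0 h 1).foldl (fun st i =>
    (PySem.List.pyRange 0 w 1).foldl (fun st j =>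
      if pvSeenGet st.1 i j = true ∨ pvCell G i j = bg then st
      else
        let color := pvCell G i j
        let r := pvFlood G color h w fuel [(i, j)] (pvSeenSet st.1 i j) []
        (r.1, st.2 ++ [r.2])) st) (seen0, ([] : List (List (Int × Int × Int))))).2

def pvFlat (G : List (List Int)) : List Int := G.flatMap (fun r => r)

-- A's _bg_color: max(set(flat), key=flat.count)
def pvBgA (G : List (List Int)) : Int :=
  (PySem.List.max? (PySem.Set.ofList (pvFlat G)) (fun v => ((pvFlat G).count v : Int))).getD 0

-- [(i,j) for i in range(h) for j in range(w) if I[i][j]==TWO]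
def pvPos2 (I : List (List Int)) : List (Int × Int) :=
  (PySem.List.pyRange 0 (I.length : Int) 1).flatMap (fun i =>
    ((PySem.List.pyRange 0 (((I.headD []).length : Int)) 1).filter
      (fun j => pvCell I i j == 2)).map (fun j => (i, j)))

-- one assignment 'sub[i][j] = v' of A's paint loop (with its bounds test)
def pvPaintStep (H W : Int) (g : List (List Int)) (t : Int × Int × Int) : List (List Int) :=
  if 0 ≤ t.1 ∧ t.1 < H ∧ 0 ≤ t.2.1 ∧ t.2.1 < W
  then g.set t.1.toNat ((g.getD t.1.toNat []).set t.2.1.toNat t.2.2)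
  else g

-- sub = [list(I[i][j0:j1+1]) for i in range(i0, i1+1)]
def pvSubA (I : List (List Int)) (i0 i1 j0 j1 : Int) : List (List Int) :=
  (PySem.List.pyRange i0 (i1 + 1) 1).map (fun i =>
    PySem.List.slice (PySem.List.pyGetD I i []) (some j0) (some (j1 + 1)))

-- _upscale(small, s)
def pvUpA (small : List (Int × Int × Int)) (s : Int) : List (Int × Int × Int) :=
  if s = 1 then small
  else small.flatMap (fun t =>
    (PySem.List.pyRange 0 s 1).flatMap (fun di =>
      (PySem.List.pyRange 0 s 1).map (fun dj => (t.1 * s + di, t.2.1 * s + dj, t.2.2))))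

-- _normalize(_upscale(small, s)) shifted by (1, 1)
def pvObjA (small : List (Int × Int × Int)) (s : Int) : List (Int × Int × Int) :=
  let up := pvUpA small s
  let mi := (PySem.List.min? (up.map (fun t => t.1)) (fun x => x)).getD 0
  let mj := (PySem.List.min? (up.map (fun t => t.2.1)) (fun x => x)).getD 0
  let norm := up.map (fun t => (t.1 - mi, t.2.1 - mj, t.2.2))
  norm.map (fun t => (t.1 + 1, t.2.1 + 1, t.2.2))

def solve_6b9890af (I : List (List Int)) : List (List Int) :=
  let pos2 := pvPos2 I
  if pos2.isEmpty then I
  else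
    let i0 := (PySem.List.min? (pos2.map (fun p => p.1)) (fun x => x)).getD 0
    let j0 := (PySem.List.min? (pos2.map (fun p => p.2)) (fun x => x)).getD 0
    let i1 := (PySem.List.max? (pos2.map (fun p => p.1)) (fun x => x)).getD 0
    let j1 := (PySem.List.max? (pos2.map (fun p => p.2)) (fun x => x)).getD 0
    let sub := pvSubA I i0 i1 j0 j1
    let subH : Int := sub.length
    let subW : Int := (sub.headD []).length
    let comps := pvComponents I (pvBgA I)
    if comps.isEmpty then sub
    else
      let small := (PySem.List.min? comps (fun c => (c.length : Int))).getD []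
      let s := PySem.Int.floordiv subW 3
      (pvObjA small s).foldl (pvPaintStep subH subW) sub

-- ===== PORT B =====
-- B's _bg_color: one counting pass over the grid, then the first strictly-greatest count wins
def pvBgB (G : List (List Int)) : Int :=
  let counts := G.foldl (fun d row => row.foldl (fun d v => d.insert v (d.getD v 0 + 1)) d)
    (PySem.Dict.empty : PySem.Dict Int Int)
  ((counts.items.foldl (fun st p =>
      match st.1 with
      | none => (some p.1, p.2)
      | some _ => if p.2 > st.2 then (some p.1, p.2) else st)
    ((none : Option Int), (0 : Int))).1).getD 0

-- the one-pass bounding-box fold over all cells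
def pvBoxB (I : List (List Int)) : Option (Int × Int × Int × Int) :=
  (PySem.List.pyRange 0 (I.length : Int) 1).foldl (fun bx i =>
    (PySem.List.pyRange 0 (((I.headD []).length : Int)) 1).foldl (fun bx j =>
      if pvCell I i j = 2 then
        match bx with
        | none => some (i, i, j, j)
        | some (a, b, c, d) => some (min a i, max b i, min c j, max d j)
      else bx) bx) (none : Option (Int × Int × Int × Int))

-- sub = [row[j0:j1+1] for row in I[i0:i1+1]]
def pvSubB (I : List (List Int)) (i0 i1 j0 j1 : Int) : List (List Int) :=
  (PySem.List.slice I (some i0) (some (i1 + 1))).map (fun row =>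
    PySem.List.slice row (some j0) (some (j1 + 1)))

-- per-cell gather paint of the smallest component into the cropped grid
def pvGridB (sub : List (List Int)) (small : List (Int × Int × Int)) : List (List Int) :=
  let subH : Int := sub.length
  let subW : Int := (sub.headD []).length
  let mi := (PySem.List.min? (small.map (fun t => t.1)) (fun x => x)).getD 0
  let mj := (PySem.List.min? (small.map (fun t => t.2.1)) (fun x => x)).getD 0
  let v := (small.headD (0, 0, 0)).2.2
  let cells : PySem.Set (Int × Int) := PySem.Set.ofList (small.map (fun t => (t.1, t.2.1)))
  let s := PySem.Int.floordiv subW 3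
  (PySem.List.pyRange 0 subH 1).map (fun r =>
    (PySem.List.pyRange 0 subW 1).map (fun c =>
      if 1 ≤ s ∧ 1 ≤ r ∧ 1 ≤ c ∧
          (PySem.Int.floordiv (r - 1) s + mi, PySem.Int.floordiv (c - 1) s + mj) ∈ cells
      then v else pvCell sub r c))

def solve_6b9890af_alt (I : List (List Int)) : List (List Int) :=
  match pvBoxB I with
  | none => I
  | some (i0, i1, j0, j1) =>
    let sub := pvSubB I i0 i1 j0 j1
    let comps := pvComponents I (pvBgB I)
    if comps.isEmpty then sub
    else pvGridB sub ((PySem.List.min? comps (fun c => (c.length : Int))).getD [])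

-- ===== PRECONDITION & SPEC =====
-- row-major list of all cell coordinates (the domain both programs scan)
def pvAllCells (I : List (List Int)) : List (Int × Int) :=
  (PySem.List.pyRange 0 (I.length : Int) 1).flatMap (fun i =>
    (PySem.List.pyRange 0 (((I.headD []).length : Int)) 1).map (fun j => (i, j)))

-- the most frequent value of the flattened grid is unique
def pvUniqueMax (I : List (List Int)) : Prop :=
  ∃ m ∈ pvFlat I, ∀ x ∈ pvFlat I, x ≠ m → (pvFlat I).count x < (pvFlat I).count m

-- some scanned cell differs from A's background colour (then A's component list is nonempty)
def pvHasNonBg (I : List (List Int)) : Prop :=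
  ∃ p ∈ pvAllCells I, pvCell I p.1 p.2 ≠ pvBgA I

-- width of the bounding box of the colour-2 cells
def pvBoxW (I : List (List Int)) : Int :=
  (PySem.List.max? ((pvPos2 I).map (fun p => p.2)) (fun x => x)).getD 0 -
    (PySem.List.min? ((pvPos2 I).map (fun p => p.2)) (fun x => x)).getD 0 + 1

-- Pre_ excludes: the empty grid and grids whose first row is longer than some later row (A raises
-- IndexError); grids containing a 2 whose most frequent colour is tied (A's background pick then
-- depends on CPython set-iteration order); and grids whose colour-2 box is narrower than 3 while a
-- non-background cell exists (A raises ValueError on min of an empty sequence).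
def Pre_solve_6b9890af (I : List (List Int)) : Prop :=
  I ≠ [] ∧ (∀ row ∈ I, (I.headD []).length ≤ row.length) ∧
    (pvPos2 I ≠ [] → pvUniqueMax I ∧ (pvHasNonBg I → 3 ≤ pvBoxW I))

instance (I : List (List Int)) : Decidable (Pre_solve_6b9890af I) := by
  unfold Pre_solve_6b9890af pvUniqueMax pvHasNonBg; infer_instance

def pvWitness_solve_6b9890af : List (List Int) := [[0, 2, 2, 2], [0, 1, 0, 0]]

def Spec_solve_6b9890af (I : List (List Int)) (out : List (List Int)) : Prop :=
  out = solve_6b9890af_alt I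
instance (I : List (List Int)) (out : List (List Int)) : Decidable (Spec_solve_6b9890af I out) := by
  unfold Spec_solve_6b9890af; infer_instance

-- ===== CLAIM (what is proved, stated in full; the proofs are below) =====
def Claim_equal_solve_6b9890af : Prop :=
  ∀ (I : List (List Int)), Dom_solve_6b9890af I → Pre_solve_6b9890af I →
    Spec_solve_6b9890af I (solve_6b9890af I)

-- ===== LEMMAS AND PROOFS =====

-- B's box-fold step once the `cell = 2` test has been factored out
def pvBStep (bx : Option (Int × Int × Int × Int)) (p : Int × Int) : Option (Int × Int × Int × Int) :=
  match bx with
  | none => some (p.1, p.1, p.2, p.2)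
  | some (a, b, c, d) => some (min a p.1, max b p.1, min c p.2, max d p.2)

theorem pvPos2_eq_filter (I : List (List Int)) :
    pvPos2 I = (pvAllCells I).filter (fun p => pvCell I p.1 p.2 == 2) := by
  unfold pvPos2 pvAllCells
  rw [List.filter_flatMap]
  refine List.flatMap_congr ?_ ; intro i _
  rw [List.filter_map]
  rfl

theorem pvNested_eq_foldl {β : Type} (I : List (List Int)) (f : β → (Int × Int) → β) (init : β) :
    (PySem.List.pyRange 0 (I.length : Int) 1).foldl (fun st i =>
      (PySem.List.pyRange 0 (((I.headD []).length : Int)) 1).foldl (fun st j => f st (i, j)) st) init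
    = (pvAllCells I).foldl f init := by
  unfold pvAllCells
  rw [List.foldl_flatMap]
  simp only [List.foldl_map]

theorem pvBoxFold (L : List (Int × Int)) :
    ∀ (a b c d : Int), L.foldl pvBStep (some (a, b, c, d)) =
      some (L.foldl (fun x p => min x p.1) a, L.foldl (fun x p => max x p.1) b,
            L.foldl (fun x p => min x p.2) c, L.foldl (fun x p => max x p.2) d) := by
  induction L with
  | nil => intro a b c d; rfl
  | cons p t ih => intro a b c d; simpa [pvBStep] using ih (min a p.1) (max b p.1) (min c p.2) (max d p.2)

-- the first-extremal min?/max? (no tie issue: the VALUE of a min over Int with key id is unique)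
theorem pvMinVal {xs : List Int} {z : Int} (d : Int) (hz : z ∈ xs) (hmin : ∀ y ∈ xs, z ≤ y) :
    (PySem.List.min? xs (fun x => x)).getD d = z := by
  have hne : xs ≠ [] := by rintro rfl; exact absurd hz (by simp)
  obtain ⟨m, hm⟩ : ∃ m, PySem.List.min? xs (fun x => x) = some m := by
    cases h : PySem.List.min? xs (fun x => x) with
    | none => exact absurd ((PySem.List.min?_eq_none_iff xs (fun x => x)).mp h) hne
    | some m => exact ⟨m, rfl⟩
  have h1 := PySem.List.min?_mem hm
  have h2 := PySem.List.min?_isMin hm z hz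
  simp [hm, le_antisymm h2 (hmin m h1)]

theorem pvBgA_eq {I : List (List Int)} {m : Int} (hm : m ∈ pvFlat I)
    (hu : ∀ x ∈ pvFlat I, x ≠ m → (pvFlat I).count x < (pvFlat I).count m) :
    pvBgA I = m := by
  unfold pvBgA
  have hms : m ∈ PySem.Set.ofList (pvFlat I) := by
    simp [PySem.Set.mem_ofList, hm]
  obtain ⟨r, hr⟩ : ∃ r, PySem.List.max? (PySem.Set.ofList (pvFlat I))
      (fun v => ((pvFlat I).count v : Int)) = some r := by
    cases h : PySem.List.max? (PySem.Set.ofList (pvFlat I)) (fun v => ((pvFlat I).count v : Int)) with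
    | none =>
      have := (PySem.List.max?_eq_none_iff _ _).mp h
      rw [this] at hms; exact absurd hms (by simp)
    | some r => exact ⟨r, rfl⟩
  have hrf : r ∈ pvFlat I := by have := PySem.List.max?_mem hr; rwa [PySem.Set.mem_ofList] at this
  have hle := PySem.List.max?_isMax hr m hms
  rw [hr]
  by_contra hne
  have : r ≠ m := by simpa using hne
  have := hu r hrf this
  omega

-- B's scan over the items of the counter: the step function of pvBgB
def pvScanStep (st : Option Int × Int) (p : Int × Int) : Option Int × Int :=
  match st.1 with
  | none => (some p.1, p.2)
  | some _ => if p.2 > st.2 then (some p.1, p.2) else st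

theorem pvScan (cnt : Int → Int) : ∀ (K : List Int) (b : Int),
    ∃ b', (K.map (fun k => (k, cnt k))).foldl pvScanStep (some b, cnt b) = (some b', cnt b') ∧
      (b' = b ∨ b' ∈ K) ∧ cnt b ≤ cnt b' ∧ ∀ k ∈ K, cnt k ≤ cnt b' := by
  intro K
  induction K with
  | nil => intro b; exact ⟨b, rfl, Or.inl rfl, le_refl _, by simp⟩
  | cons k K ih =>
    intro b
    by_cases h : cnt k > cnt b
    · obtain ⟨b', h1, h2, h3, h4⟩ := ih k
      refine ⟨b', ?_, ?_, by omega, ?_⟩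
      · simpa [pvScanStep, h] using h1
      · rcases h2 with h2 | h2
        · exact Or.inr (by simp [h2])
        · exact Or.inr (by simp [h2])
      · intro x hx
        rcases List.mem_cons.mp hx with rfl | hx
        · omega
        · exact h4 x hx
    · obtain ⟨b', h1, h2, h3, h4⟩ := ih b
      refine ⟨b', ?_, ?_, h3, ?_⟩
      · simpa [pvScanStep, h] using h1
      · rcases h2 with h2 | h2
        · exact Or.inl h2
        · exact Or.inr (by simp [h2])
      · intro x hx
        rcases List.mem_cons.mp hx with rfl | hx
        · omega
        · exact h4 x hx

theorem pvBgB_eq {I : List (List Int)} {m : Int} (hm : m ∈ pvFlat I)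
    (hu : ∀ x ∈ pvFlat I, x ≠ m → (pvFlat I).count x < (pvFlat I).count m) :
    pvBgB I = m := by
  unfold pvBgB
  have hcnt : I.foldl (fun d row => row.foldl (fun d v => d.insert v (d.getD v 0 + 1)) d)
      (PySem.Dict.empty : PySem.Dict Int Int) = PySem.Dict.counter (pvFlat I) := by
    rw [← PySem.Dict.foldl_insert_getD_add_one_eq_counter]
    unfold pvFlat
    rw [List.foldl_flatMap]
  simp only [hcnt, PySem.Dict.items_counter]
  obtain ⟨k0, K, hK⟩ : ∃ k0 K, PySem.Set.ofList (pvFlat I) = k0 :: K := by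
    cases h : PySem.Set.ofList (pvFlat I) with
    | nil =>
      have : m ∈ PySem.Set.ofList (pvFlat I) := by rw [PySem.Set.mem_ofList]; exact hm
      rw [h] at this; exact absurd this (by simp)
    | cons k0 K => exact ⟨k0, K, rfl⟩
  rw [hK]
  have step1 : (List.map (fun k => (k, ((pvFlat I).count k : Int))) (k0 :: K)).foldl pvScanStep
      ((none : Option Int), (0 : Int)) =
      (List.map (fun k => (k, ((pvFlat I).count k : Int))) K).foldl pvScanStep
      (some k0, ((pvFlat I).count k0 : Int)) := by
    simp [pvScanStep]
  obtain ⟨b', h1, h2, h3, h4⟩ := pvScan (fun k => ((pvFlat I).count k : Int)) K k0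
  have hfold : (List.map (fun k => (k, ((pvFlat I).count k : Int))) (k0 :: K)).foldl
      (fun st p => match st.1 with
        | none => (some p.1, p.2)
        | some _ => if p.2 > st.2 then (some p.1, p.2) else st)
      ((none : Option Int), (0 : Int)) = (some b', ((pvFlat I).count b' : Int)) := by
    show (List.map (fun k => (k, ((pvFlat I).count k : Int))) (k0 :: K)).foldl pvScanStep
      ((none : Option Int), (0 : Int)) = _
    rw [step1, h1]
  rw [hfold]
  -- b' is in the set of values and its count dominates every value's count, so b' = m
  have hb'set : b' ∈ PySem.Set.ofList (pvFlat I) := by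
    rw [hK]; rcases h2 with rfl | h2
    · exact List.mem_cons_self
    · exact List.mem_cons_of_mem _ h2
  have hb'flat : b' ∈ pvFlat I := by rwa [PySem.Set.mem_ofList] at hb'set
  have hmset : m ∈ PySem.Set.ofList (pvFlat I) := by rw [PySem.Set.mem_ofList]; exact hm
  have hmcount : ((pvFlat I).count m : Int) ≤ ((pvFlat I).count b' : Int) := by
    rw [hK] at hmset
    rcases List.mem_cons.mp hmset with rfl | hmem
    · exact h3
    · exact h4 m hmem
  by_contra hne
  have : b' ≠ m := by simpa using hne
  have := hu b' hb'flat this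
  omega

-- the body of the component scan, as a step over one cell
def pvCompStep (G : List (List Int)) (bg : Int)
    (st : List (List Bool) × List (List (Int × Int × Int))) (p : Int × Int) :
    List (List Bool) × List (List (Int × Int × Int)) :=
  if pvSeenGet st.1 p.1 p.2 = true ∨ pvCell G p.1 p.2 = bg then st
  else
    let color := pvCell G p.1 p.2
    let r := pvFlood G color (G.length : Int) ((G.headD []).length : Int)
      (G.length * (G.headD []).length + 1) [(p.1, p.2)] (pvSeenSet st.1 p.1 p.2) []
    (r.1, st.2 ++ [r.2])

theorem pvComponents_eq (G : List (List Int)) (bg : Int) :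
    pvComponents G bg = ((pvAllCells G).foldl (pvCompStep G bg)
      (List.replicate G.length (List.replicate (G.headD []).length false), [])).2 := by
  unfold pvComponents
  rw [← pvNested_eq_foldl G (pvCompStep G bg)]
  rfl

theorem pvFlood_spec (G : List (List Int)) (color h w : Int) :
    ∀ (fuel : Nat) (stack : List (Int × Int)) (seen : List (List Bool)) (cur : List (Int × Int × Int)),
      ∃ rest, (pvFlood G color h w fuel stack seen cur).2 = cur ++ rest ∧
        ∀ t ∈ rest, t.2.2 = color := by
  intro fuel
  induction fuel with
  | zero => intro stack seen cur; exact ⟨[], by simp [pvFlood], by simp⟩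
  | succ n ih =>
    intro stack seen cur
    match stack with
    | [] => exact ⟨[], by simp [pvFlood], by simp⟩
    | (a, b) :: q =>
      obtain ⟨rest, h1, h2⟩ := ih
        (pvFloodStep G color h w a b (q, seen)).1
        (pvFloodStep G color h w a b (q, seen)).2
        (cur ++ [(a, b, color)])
      refine ⟨(a, b, color) :: rest, ?_, ?_⟩
      · show (pvFlood G color h w n _ _ _).2 = _
        rw [h1]; simp
      · intro t ht
        rcases List.mem_cons.mp ht with rfl | ht
        · rfl
        · exact h2 t ht

-- every emitted component is nonempty and carries a single colour (its head's)
theorem pvComps_forall (G : List (List Int)) (bg : Int) :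
    ∀ c ∈ pvComponents G bg, c ≠ [] ∧ ∀ t ∈ c, t.2.2 = (c.headD (0, 0, 0)).2.2 := by
  rw [pvComponents_eq]
  have key : ∀ (L : List (Int × Int)) (st : List (List Bool) × List (List (Int × Int × Int))),
      (∀ c ∈ st.2, c ≠ [] ∧ ∀ t ∈ c, t.2.2 = (c.headD (0, 0, 0)).2.2) →
      ∀ c ∈ (L.foldl (pvCompStep G bg) st).2, c ≠ [] ∧ ∀ t ∈ c, t.2.2 = (c.headD (0, 0, 0)).2.2 := by
    intro L
    induction L with
    | nil => intro st h; exact h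
    | cons p L ih =>
      intro st h
      apply ih
      unfold pvCompStep
      split
      · exact h
      · intro c hc
        rcases List.mem_append.mp hc with hc | hc
        · exact h c hc
        · have hc' : c = (pvFlood G (pvCell G p.1 p.2) (G.length : Int) ((G.headD []).length : Int)
            (G.length * (G.headD []).length + 1) [(p.1, p.2)] (pvSeenSet st.1 p.1 p.2) []).2 := by
            simpa using hc
          obtain ⟨rest, h1, h2⟩ := pvFlood_spec G (pvCell G p.1 p.2) (G.length : Int)
            ((G.headD []).length : Int) (G.length * (G.headD []).length)
            (pvFloodStep G (pvCell G p.1 p.2) (G.length : Int) ((G.headD []).length : Int) p.1 p.2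
              ((([] : List (Int × Int))), pvSeenSet st.1 p.1 p.2)).1
            (pvFloodStep G (pvCell G p.1 p.2) (G.length : Int) ((G.headD []).length : Int) p.1 p.2
              ((([] : List (Int × Int))), pvSeenSet st.1 p.1 p.2)).2
            ([] ++ [(p.1, p.2, pvCell G p.1 p.2)])
          have hc2 : c = (p.1, p.2, pvCell G p.1 p.2) :: rest := by
            rw [hc']
            show (pvFlood G _ _ _ (G.length * (G.headD []).length + 1) _ _ _).2 = _
            rw [show (pvFlood G (pvCell G p.1 p.2) (G.length : Int) ((G.headD []).length : Int)
              (G.length * (G.headD []).length + 1) [(p.1, p.2)] (pvSeenSet st.1 p.1 p.2) [])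
              = pvFlood G (pvCell G p.1 p.2) (G.length : Int) ((G.headD []).length : Int)
                (G.length * (G.headD []).length)
                (pvFloodStep G (pvCell G p.1 p.2) (G.length : Int) ((G.headD []).length : Int) p.1 p.2
                  (([] : List (Int × Int)), pvSeenSet st.1 p.1 p.2)).1
                (pvFloodStep G (pvCell G p.1 p.2) (G.length : Int) ((G.headD []).length : Int) p.1 p.2
                  (([] : List (Int × Int)), pvSeenSet st.1 p.1 p.2)).2
                ([] ++ [(p.1, p.2, pvCell G p.1 p.2)]) from rfl]
            rw [h1]; simp
          subst hc2
          refine ⟨by simp, ?_⟩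
          intro t ht
          rcases List.mem_cons.mp ht with rfl | ht
          · rfl
          · simpa using h2 t ht
  intro c hc
  exact key (pvAllCells G) _ (by simp) c hc

-- if every scanned cell is the background colour, no component is ever started
theorem pvComps_of_all_bg (G : List (List Int)) (bg : Int)
    (hall : ∀ p ∈ pvAllCells G, pvCell G p.1 p.2 = bg) : pvComponents G bg = [] := by
  rw [pvComponents_eq]
  have key : ∀ (L : List (Int × Int)), (∀ p ∈ L, pvCell G p.1 p.2 = bg) →
      ∀ st, L.foldl (pvCompStep G bg) st = st := by
    intro L
    induction L with
    | nil => intro _ st; rfl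
    | cons p L ih =>
      intro h st
      have : pvCompStep G bg st p = st := by
        unfold pvCompStep
        have := h p (by simp)
        simp [this]
      rw [List.foldl_cons, this]
      exact ih (fun q hq => h q (by simp [hq])) st
  rw [key (pvAllCells G) hall]

theorem pvPos2_bounds (I : List (List Int)) :
    ∀ p ∈ pvPos2 I, 0 ≤ p.1 ∧ p.1 < (I.length : Int) ∧ 0 ≤ p.2 ∧ p.2 < ((I.headD []).length : Int) := by
  intro p hp
  unfold pvPos2 at hp
  obtain ⟨i, hi, hp⟩ := List.mem_flatMap.mp hp
  obtain ⟨j, hj, rfl⟩ := List.mem_map.mp hp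
  have hj' := List.mem_filter.mp hj
  have h1 := PySem.List.mem_pyRange_one.mp hi
  have h2 := PySem.List.mem_pyRange_one.mp hj'.1
  exact ⟨h1.1, h1.2, h2.1, h2.2⟩

theorem pvRangeMap {α β : Type} (l : List α) (d : α) (a b : Int) (f : α → β)
    (ha : 0 ≤ a) (hab : a ≤ b) (hb : b ≤ (l.length : Int)) :
    (PySem.List.pyRange a b 1).map (fun i => f (PySem.List.pyGetD l i d)) =
      (PySem.List.slice l (some a) (some b)).map f := by
  rw [PySem.List.slice_toNat _ ha (by omega)]
  apply List.ext_getElem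
  · simp [PySem.List.length_pyRange_one]
    omega
  · intro k hk1 hk2
    have hk : k < (b - a).toNat := by simpa [PySem.List.length_pyRange_one] using hk1
    simp only [List.getElem_map, PySem.List.getElem_pyRange_one]
    have hlt : a + (k : Int) < (l.length : Int) := by omega
    rw [PySem.List.pyGetD_eq_getElem l d (by omega) hlt]
    congr 1
    rw [List.getElem_take, List.getElem_drop]
    congr 1
    omega

-- shape of the cropped grid
theorem pvSub_shape (I : List (List Int)) (j0 j1 : Int)
    (hw : ∀ row ∈ I, (I.headD []).length ≤ row.length)
    (h0 : 0 ≤ j0) (h01 : j0 ≤ j1) (h1 : j1 < ((I.headD []).length : Int)) :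
    ∀ row ∈ I, (PySem.List.slice row (some j0) (some (j1 + 1))).length = (j1 + 1 - j0).toNat := by
  intro row hrow
  rw [PySem.List.slice_toNat _ h0 (by omega)]
  have := hw row hrow
  simp [List.length_take, List.length_drop]
  omega

theorem pvSetCell_getD (g : List (List Int)) (a b : Nat) (x : Int) (r c : Nat)
    (hb : b < (g.getD a []).length) :
    ((g.set a ((g.getD a []).set b x)).getD r []).getD c 0 =
      if a = r ∧ b = c then x else (g.getD r []).getD c 0 := by
  have hlen : a < g.length := by
    by_contra hlen
    have hnone : g[a]? = none := by rw [List.getElem?_eq_none_iff]; omega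
    rw [List.getD_eq_getElem?_getD, hnone] at hb
    simp at hb
  by_cases har : a = r
  · subst har
    rw [List.getD_eq_getElem?_getD (l := g.set _ _), List.getElem?_set_self hlen]
    simp only [Option.getD_some]
    by_cases hbc : b = c
    · subst hbc
      rw [List.getD_eq_getElem?_getD (l := List.set _ _ _), List.getElem?_set_self hb]
      simp
    · rw [List.getD_eq_getElem?_getD (l := List.set _ _ _), List.getElem?_set_ne hbc,
        ← List.getD_eq_getElem?_getD]
      simp [hbc]
  · rw [List.getD_eq_getElem?_getD (l := g.set _ _), List.getElem?_set_ne har,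
      ← List.getD_eq_getElem?_getD]
    simp [har]

theorem pvStepRow (H W : Int) (g : List (List Int)) (t : Int × Int × Int) (r : Nat) :
    ((pvPaintStep H W g t).getD r []).length = (g.getD r []).length := by
  unfold pvPaintStep
  split
  · by_cases har : t.1.toNat = r
    · subst har
      by_cases hlen : t.1.toNat < g.length
      · rw [List.getD_eq_getElem?_getD (l := g.set _ _), List.getElem?_set_self hlen]
        simp only [Option.getD_some, List.length_set]
      · rw [List.set_eq_of_length_le (by omega)]
    · rw [List.getD_eq_getElem?_getD (l := g.set _ _), List.getElem?_set_ne har,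
        ← List.getD_eq_getElem?_getD]
  · rfl

theorem pvStepLen (H W : Int) (g : List (List Int)) (t : Int × Int × Int) :
    (pvPaintStep H W g t).length = g.length := by
  unfold pvPaintStep; split <;> simp

theorem pvPaintShape (H W : Int) (obj : List (Int × Int × Int)) :
    ∀ (g : List (List Int)),
      (obj.foldl (pvPaintStep H W) g).length = g.length ∧
      ∀ r : Nat, (((obj.foldl (pvPaintStep H W) g)).getD r []).length = (g.getD r []).length := by
  induction obj with
  | nil => intro g; exact ⟨rfl, fun r => rfl⟩
  | cons t rest ih =>
    intro g
    rw [List.foldl_cons]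
    obtain ⟨h1, h2⟩ := ih (pvPaintStep H W g t)
    exact ⟨h1.trans (pvStepLen H W g t), fun r => (h2 r).trans (pvStepRow H W g t r)⟩

theorem pvPaintVal (Hn Wn : Nat) (v : Int) (obj : List (Int × Int × Int))
    (hv : ∀ t ∈ obj, t.2.2 = v) :
    ∀ (g : List (List Int)), g.length = Hn → (∀ r : Nat, r < Hn → ((g.getD r []).length) = Wn) →
    ∀ (r c : Nat), r < Hn → c < Wn →
      ((obj.foldl (pvPaintStep (Hn : Int) (Wn : Int)) g).getD r []).getD c 0 =
        if ∃ t ∈ obj, t.1 = (r : Int) ∧ t.2.1 = (c : Int) then v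
        else (g.getD r []).getD c 0 := by
  induction obj with
  | nil => intro g _ _ r c _ _; simp
  | cons t rest ih =>
    intro g hg hrows r c hr hc
    have hv' : ∀ t' ∈ rest, t'.2.2 = v := fun t' ht' => hv t' (List.mem_cons_of_mem _ ht')
    rw [List.foldl_cons]
    have hlen' : (pvPaintStep (Hn : Int) (Wn : Int) g t).length = Hn :=
      (pvStepLen _ _ g t).trans hg
    have hrows' : ∀ r' : Nat, r' < Hn → (((pvPaintStep (Hn : Int) (Wn : Int) g t).getD r' []).length) = Wn :=
      fun r' hr' => (pvStepRow _ _ g t r').trans (hrows r' hr')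
    rw [ih hv' _ hlen' hrows' r c hr hc]
    by_cases hrest : ∃ t' ∈ rest, t'.1 = (r : Int) ∧ t'.2.1 = (c : Int)
    · rw [if_pos hrest, if_pos ?_]
      obtain ⟨t', ht', hm⟩ := hrest
      exact ⟨t', List.mem_cons_of_mem _ ht', hm⟩
    · rw [if_neg hrest]
      by_cases hmatch : t.1 = (r : Int) ∧ t.2.1 = (c : Int)
      · have hguard : 0 ≤ t.1 ∧ t.1 < (Hn : Int) ∧ 0 ≤ t.2.1 ∧ t.2.1 < (Wn : Int) := by omega
        have hstep : pvPaintStep (Hn : Int) (Wn : Int) g t =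
            g.set t.1.toNat ((g.getD t.1.toNat []).set t.2.1.toNat t.2.2) := by
          unfold pvPaintStep; rw [if_pos hguard]
        have hb : t.2.1.toNat < (g.getD t.1.toNat []).length := by
          rw [hrows t.1.toNat (by omega)]; omega
        rw [hstep, pvSetCell_getD _ _ _ _ _ _ hb,
          if_pos (show t.1.toNat = r ∧ t.2.1.toNat = c by omega),
          if_pos ⟨t, List.mem_cons_self, hmatch⟩]
        exact hv t List.mem_cons_self
      · have hnone : ¬ ∃ t' ∈ t :: rest, t'.1 = (r : Int) ∧ t'.2.1 = (c : Int) := by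
          rintro ⟨t', ht', hm⟩
          rcases List.mem_cons.mp ht' with rfl | ht'
          · exact hmatch hm
          · exact hrest ⟨t', ht', hm⟩
        rw [if_neg hnone]
        unfold pvPaintStep
        split
        · rename_i hguard
          rw [pvSetCell_getD _ _ _ _ _ _ (by rw [hrows t.1.toNat (by omega)]; omega),
            if_neg (by omega)]
        · rfl

theorem pvUpMem (small : List (Int × Int × Int)) (s : Int) (hs : 1 ≤ s) (u : Int × Int × Int) :
    (u ∈ (if s = 1 then small
      else small.flatMap (fun t =>
        (PySem.List.pyRange 0 s 1).flatMap (fun di =>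
          (PySem.List.pyRange 0 s 1).map (fun dj => (t.1 * s + di, t.2.1 * s + dj, t.2.2)))))) ↔
    ∃ t ∈ small, ∃ di dj : Int, 0 ≤ di ∧ di < s ∧ 0 ≤ dj ∧ dj < s ∧
      u = (t.1 * s + di, t.2.1 * s + dj, t.2.2) := by
  by_cases h1 : s = 1
  · subst h1
    rw [if_pos rfl]
    constructor
    · intro hu
      exact ⟨u, hu, 0, 0, le_refl _, by omega, le_refl _, by omega, by simp⟩
    · rintro ⟨t, ht, di, dj, h2, h3, h4, h5, rfl⟩
      have : di = 0 := by omega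
      subst this
      have : dj = 0 := by omega
      subst this
      simpa using ht
  · rw [if_neg h1]
    simp only [List.mem_flatMap, List.mem_map, PySem.List.mem_pyRange_one]
    constructor
    · rintro ⟨t, ht, di, hdi, dj, hdj, rfl⟩
      exact ⟨t, ht, di, dj, hdi.1, hdi.2, hdj.1, hdj.2, rfl⟩
    · rintro ⟨t, ht, di, dj, h2, h3, h4, h5, rfl⟩
      exact ⟨t, ht, di, ⟨h2, h3⟩, dj, ⟨h4, h5⟩, rfl⟩

theorem pvUpMinFst (small : List (Int × Int × Int)) (s : Int) (hs : 1 ≤ s) (hne : small ≠ [])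
    (up : List (Int × Int × Int))
    (hup : ∀ u, u ∈ up ↔ ∃ t ∈ small, ∃ di dj : Int, 0 ≤ di ∧ di < s ∧ 0 ≤ dj ∧ dj < s ∧
      u = (t.1 * s + di, t.2.1 * s + dj, t.2.2)) :
    (PySem.List.min? (up.map (fun t => t.1)) (fun x => x)).getD 0 =
      (PySem.List.min? (small.map (fun t => t.1)) (fun x => x)).getD 0 * s := by
  obtain ⟨m, hm⟩ : ∃ m, PySem.List.min? (small.map (fun t => t.1)) (fun x => x) = some m := by
    cases h : PySem.List.min? (small.map (fun t => t.1)) (fun x => x) with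
    | none =>
      have := (PySem.List.min?_eq_none_iff _ _).mp h
      exact absurd (List.map_eq_nil_iff.mp this) hne
    | some m => exact ⟨m, rfl⟩
  rw [hm]
  simp only [Option.getD_some]
  obtain ⟨t0, ht0, ht0e⟩ := List.mem_map.mp (PySem.List.min?_mem hm)
  have hmin := PySem.List.min?_isMin hm
  apply pvMinVal
  · rw [List.mem_map]
    exact ⟨(t0.1 * s + 0, t0.2.1 * s + 0, t0.2.2), (hup _).mpr
      ⟨t0, ht0, 0, 0, le_refl _, by omega, le_refl _, by omega, rfl⟩, by rw [ht0e]; ring⟩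
  · intro y hy
    obtain ⟨u, hu, rfl⟩ := List.mem_map.mp hy
    obtain ⟨t, ht, di, dj, h2, h3, h4, h5, rfl⟩ := (hup u).mp hu
    have : m ≤ t.1 := hmin t.1 (List.mem_map.mpr ⟨t, ht, rfl⟩)
    have h6 : m * s ≤ t.1 * s := by
      apply mul_le_mul_of_nonneg_right this (by omega)
    simp only
    omega

theorem pvUpMinSnd (small : List (Int × Int × Int)) (s : Int) (hs : 1 ≤ s) (hne : small ≠ [])
    (up : List (Int × Int × Int))
    (hup : ∀ u, u ∈ up ↔ ∃ t ∈ small, ∃ di dj : Int, 0 ≤ di ∧ di < s ∧ 0 ≤ dj ∧ dj < s ∧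
      u = (t.1 * s + di, t.2.1 * s + dj, t.2.2)) :
    (PySem.List.min? (up.map (fun t => t.2.1)) (fun x => x)).getD 0 =
      (PySem.List.min? (small.map (fun t => t.2.1)) (fun x => x)).getD 0 * s := by
  obtain ⟨m, hm⟩ : ∃ m, PySem.List.min? (small.map (fun t => t.2.1)) (fun x => x) = some m := by
    cases h : PySem.List.min? (small.map (fun t => t.2.1)) (fun x => x) with
    | none =>
      have := (PySem.List.min?_eq_none_iff _ _).mp h
      exact absurd (List.map_eq_nil_iff.mp this) hne
    | some m => exact ⟨m, rfl⟩
  rw [hm]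
  simp only [Option.getD_some]
  obtain ⟨t0, ht0, ht0e⟩ := List.mem_map.mp (PySem.List.min?_mem hm)
  have hmin := PySem.List.min?_isMin hm
  apply pvMinVal
  · rw [List.mem_map]
    exact ⟨(t0.1 * s + 0, t0.2.1 * s + 0, t0.2.2), (hup _).mpr
      ⟨t0, ht0, 0, 0, le_refl _, by omega, le_refl _, by omega, rfl⟩, by rw [ht0e]; ring⟩
  · intro y hy
    obtain ⟨u, hu, rfl⟩ := List.mem_map.mp hy
    obtain ⟨t, ht, di, dj, h2, h3, h4, h5, rfl⟩ := (hup u).mp hu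
    have : m ≤ t.2.1 := hmin t.2.1 (List.mem_map.mpr ⟨t, ht, rfl⟩)
    have h6 : m * s ≤ t.2.1 * s := by
      apply mul_le_mul_of_nonneg_right this (by omega)
    simp only
    omega

theorem pvBoxB_eq (I : List (List Int)) : pvBoxB I = (pvPos2 I).foldl pvBStep none := by
  have e1 : pvBoxB I = (pvAllCells I).foldl
      (fun bx p => if pvCell I p.1 p.2 = 2 then pvBStep bx p else bx)
      (none : Option (Int × Int × Int × Int)) :=
    pvNested_eq_foldl I (fun bx p => if pvCell I p.1 p.2 = 2 then pvBStep bx p else bx) none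
  rw [e1, PySem.List.foldl_ite_eq_foldl_filter, pvPos2_eq_filter]
  exact congrArg (List.foldl pvBStep none) (List.filter_congr (fun p _ => (Bool.beq_eq_decide_eq _ 2).symm))

theorem pvSubEq (I : List (List Int)) (i0 i1 j0 j1 : Int)
    (h0 : 0 ≤ i0) (h01 : i0 ≤ i1 + 1) (h1 : i1 + 1 ≤ (I.length : Int)) :
    pvSubA I i0 i1 j0 j1 = pvSubB I i0 i1 j0 j1 := by
  unfold pvSubA pvSubB
  exact pvRangeMap I [] i0 (i1 + 1)
    (fun row => PySem.List.slice row (some j0) (some (j1 + 1))) h0 h01 h1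

theorem pvObjA_def (small : List (Int × Int × Int)) (s : Int) : pvObjA small s =
    ((pvUpA small s).map (fun t =>
      (t.1 - (PySem.List.min? ((pvUpA small s).map (fun t => t.1)) (fun x => x)).getD 0,
       t.2.1 - (PySem.List.min? ((pvUpA small s).map (fun t => t.2.1)) (fun x => x)).getD 0,
       t.2.2))).map (fun t => (t.1 + 1, t.2.1 + 1, t.2.2)) := rfl

theorem pvGridB_def (sub : List (List Int)) (small : List (Int × Int × Int)) :
    pvGridB sub small =
    (PySem.List.pyRange 0 ((sub.length : Nat) : Int) 1).map (fun r =>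
      (PySem.List.pyRange 0 (((sub.headD []).length : Nat) : Int) 1).map (fun c =>
        if 1 ≤ PySem.Int.floordiv (((sub.headD []).length : Nat) : Int) 3 ∧ 1 ≤ r ∧ 1 ≤ c ∧
            (PySem.Int.floordiv (r - 1) (PySem.Int.floordiv (((sub.headD []).length : Nat) : Int) 3) +
               (PySem.List.min? (small.map (fun t => t.1)) (fun x => x)).getD 0,
             PySem.Int.floordiv (c - 1) (PySem.Int.floordiv (((sub.headD []).length : Nat) : Int) 3) +
               (PySem.List.min? (small.map (fun t => t.2.1)) (fun x => x)).getD 0) ∈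
              PySem.Set.ofList (small.map (fun t => (t.1, t.2.1)))
        then (small.headD (0, 0, 0)).2.2 else pvCell sub r c)) := rfl

theorem pvListExtGetD {α : Type} (d : α) (l1 l2 : List α) (hl : l1.length = l2.length)
    (h : ∀ i : Nat, i < l1.length → l1.getD i d = l2.getD i d) : l1 = l2 := by
  apply List.ext_getElem hl
  intro i h1 h2
  have := h i h1
  rwa [List.getD_eq_getElem _ _ h1, List.getD_eq_getElem _ _ h2] at this

theorem pvPaintEq (sub : List (List Int)) (small : List (Int × Int × Int))
    (hsm : small ≠ []) (hcol : ∀ t ∈ small, t.2.2 = (small.headD (0, 0, 0)).2.2)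
    (hrows : ∀ r : Nat, r < sub.length → ((sub.getD r []).length) = (sub.headD []).length)
    (hW3 : 3 ≤ (sub.headD []).length) :
    (pvObjA small (PySem.Int.floordiv (((sub.headD []).length : Nat) : Int) 3)).foldl
        (pvPaintStep ((sub.length : Nat) : Int) (((sub.headD []).length : Nat) : Int)) sub
      = pvGridB sub small := by
  set Hn := sub.length with hHn
  set Wn := (sub.headD []).length with hWn
  set s := PySem.Int.floordiv (Wn : Int) 3 with hsdef
  have hs : 1 ≤ s := by
    rw [hsdef]
    rw [PySem.Int.le_floordiv_iff_mul_le (by omega)]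
    omega
  have hs0 : (0 : Int) < s := by omega
  set v := (small.headD (0, 0, 0)).2.2 with hvdef
  set miB := (PySem.List.min? (small.map (fun t => t.1)) (fun x => x)).getD 0 with hmiB
  set mjB := (PySem.List.min? (small.map (fun t => t.2.1)) (fun x => x)).getD 0 with hmjB
  have hup : ∀ u, u ∈ pvUpA small s ↔ ∃ t ∈ small, ∃ di dj : Int,
      0 ≤ di ∧ di < s ∧ 0 ≤ dj ∧ dj < s ∧ u = (t.1 * s + di, t.2.1 * s + dj, t.2.2) := by
    intro u; exact pvUpMem small s hs u
  have hmiA : (PySem.List.min? ((pvUpA small s).map (fun t => t.1)) (fun x => x)).getD 0 = miB * s :=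
    pvUpMinFst small s hs hsm _ hup
  have hmjA : (PySem.List.min? ((pvUpA small s).map (fun t => t.2.1)) (fun x => x)).getD 0 = mjB * s :=
    pvUpMinSnd small s hs hsm _ hup
  -- min bound: every first / second coordinate of small is ≥ its min
  have hminfst : ∀ t ∈ small, miB ≤ t.1 := by
    intro t ht
    obtain ⟨m, hm⟩ : ∃ m, PySem.List.min? (small.map (fun t => t.1)) (fun x => x) = some m := by
      cases h : PySem.List.min? (small.map (fun t => t.1)) (fun x => x) with
      | none => exact absurd (List.map_eq_nil_iff.mp ((PySem.List.min?_eq_none_iff _ _).mp h)) hsm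
      | some m => exact ⟨m, rfl⟩
    rw [hmiB, hm]
    simpa using PySem.List.min?_isMin hm t.1 (List.mem_map.mpr ⟨t, ht, rfl⟩)
  have hminsnd : ∀ t ∈ small, mjB ≤ t.2.1 := by
    intro t ht
    obtain ⟨m, hm⟩ : ∃ m, PySem.List.min? (small.map (fun t => t.2.1)) (fun x => x) = some m := by
      cases h : PySem.List.min? (small.map (fun t => t.2.1)) (fun x => x) with
      | none => exact absurd (List.map_eq_nil_iff.mp ((PySem.List.min?_eq_none_iff _ _).mp h)) hsm
      | some m => exact ⟨m, rfl⟩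
    rw [hmjB, hm]
    simpa using PySem.List.min?_isMin hm t.2.1 (List.mem_map.mpr ⟨t, ht, rfl⟩)
  -- the object A paints, characterised
  have hobj : ∀ x, x ∈ pvObjA small s ↔ ∃ u ∈ pvUpA small s,
      x = (u.1 - miB * s + 1, u.2.1 - mjB * s + 1, u.2.2) := by
    intro x
    rw [pvObjA_def, hmiA, hmjA]
    simp only [List.mem_map]
    constructor
    · rintro ⟨n, ⟨u, hu, rfl⟩, rfl⟩
      exact ⟨u, hu, rfl⟩
    · rintro ⟨u, hu, rfl⟩
      exact ⟨(u.1 - miB * s, u.2.1 - mjB * s, u.2.2), ⟨u, hu, rfl⟩, rfl⟩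
  have hv_obj : ∀ t ∈ pvObjA small s, t.2.2 = v := by
    intro t ht
    obtain ⟨u, hu, rfl⟩ := (hobj t).mp ht
    obtain ⟨t', ht', _, _, _, _, _, _, rfl⟩ := (hup u).mp hu
    exact hcol t' ht'
  -- both grids, cell by cell
  have hshape := pvPaintShape ((Hn : Nat) : Int) ((Wn : Nat) : Int) (pvObjA small s) sub
  have hlenB : (pvGridB sub small).length = Hn := by
    rw [pvGridB_def]
    simp only [List.length_map, PySem.List.length_pyRange_one]
    omega
  have hrowB : ∀ r : Nat, r < Hn → (pvGridB sub small).getD r [] =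
      (PySem.List.pyRange 0 ((Wn : Nat) : Int) 1).map (fun c =>
        if 1 ≤ s ∧ 1 ≤ ((r : Nat) : Int) ∧ 1 ≤ c ∧
            (PySem.Int.floordiv (((r : Nat) : Int) - 1) s + miB,
             PySem.Int.floordiv (c - 1) s + mjB) ∈
            PySem.Set.ofList (small.map (fun t => (t.1, t.2.1)))
        then v else pvCell sub ((r : Nat) : Int) c) := by
    intro r hrH
    rw [pvGridB_def, ← hWn, ← hHn, ← hsdef, ← hmiB, ← hmjB, ← hvdef]
    rw [← PySem.List.pyGetD_natCast, PySem.List.pyGetD_map_pyRange _ Hn r _ hrH]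
  have hentryB : ∀ (r c : Nat), r < Hn → c < Wn → ((pvGridB sub small).getD r []).getD c 0 =
      (if 1 ≤ s ∧ 1 ≤ ((r : Nat) : Int) ∧ 1 ≤ ((c : Nat) : Int) ∧
          (PySem.Int.floordiv (((r : Nat) : Int) - 1) s + miB,
           PySem.Int.floordiv (((c : Nat) : Int) - 1) s + mjB) ∈
          PySem.Set.ofList (small.map (fun t => (t.1, t.2.1)))
      then v else pvCell sub ((r : Nat) : Int) ((c : Nat) : Int)) := by
    intro r c hrH hcW
    rw [hrowB r hrH, ← PySem.List.pyGetD_natCast, PySem.List.pyGetD_map_pyRange _ Wn c _ hcW]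
  apply pvListExtGetD []
  · rw [hshape.1, hlenB, hHn]
  · intro r hrf
    have hrH : r < Hn := by rw [hHn, ← hshape.1]; exact hrf
    apply pvListExtGetD 0
    · rw [hshape.2 r, hrows r hrH, hrowB r hrH]
      simp only [List.length_map, PySem.List.length_pyRange_one]
      omega
    · intro c hcf
      have hcW : c < Wn := by rw [hshape.2 r, hrows r hrH] at hcf; exact hcf
      rw [pvPaintVal Hn Wn v (pvObjA small s) hv_obj sub rfl (fun r' hr' => hrows r' hr') r c hrH hcW,
        hentryB r c hrH hcW]
      -- condition equivalence
      have hcells : ∀ x y : Int, ((x, y) ∈ PySem.Set.ofList (small.map (fun t => (t.1, t.2.1)))) ↔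
          ∃ t ∈ small, t.1 = x ∧ t.2.1 = y := by
        intro x y
        rw [PySem.Set.mem_ofList]
        simp only [List.mem_map]
        constructor
        · rintro ⟨t, ht, he⟩
          exact ⟨t, ht, congrArg Prod.fst he, congrArg Prod.snd he⟩
        · rintro ⟨t, ht, h1, h2⟩
          exact ⟨t, ht, by rw [h1, h2]⟩
      have hcond : (∃ t ∈ pvObjA small s, t.1 = (r : Int) ∧ t.2.1 = (c : Int)) ↔
          (1 ≤ s ∧ 1 ≤ (r : Int) ∧ 1 ≤ (c : Int) ∧
            (PySem.Int.floordiv ((r : Int) - 1) s + miB, PySem.Int.floordiv ((c : Int) - 1) s + mjB) ∈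
              PySem.Set.ofList (small.map (fun t => (t.1, t.2.1)))) := by
        constructor
        · rintro ⟨x, hx, hx1, hx2⟩
          obtain ⟨u, hu, rfl⟩ := (hobj x).mp hx
          obtain ⟨t, ht, di, dj, hd1, hd2, hd3, hd4, rfl⟩ := (hup u).mp hu
          simp only at hx1 hx2
          have hfm : miB * s ≤ t.1 * s := mul_le_mul_of_nonneg_right (hminfst t ht) (by omega)
          have hfm2 : mjB * s ≤ t.2.1 * s := mul_le_mul_of_nonneg_right (hminsnd t ht) (by omega)
          refine ⟨hs, by omega, by omega, ?_⟩
          rw [hcells]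
          refine ⟨t, ht, ?_, ?_⟩
          · have he : (r : Int) - 1 = (t.1 - miB) * s + di := by
              rw [sub_mul]; omega
            have hq : PySem.Int.floordiv ((t.1 - miB) * s + di) s = t.1 - miB :=
              (PySem.Int.floordiv_eq_iff_of_pos hs0).mpr
                ⟨by omega, by rw [add_mul, one_mul]; omega⟩
            rw [he, hq]
            omega
          · have he : (c : Int) - 1 = (t.2.1 - mjB) * s + dj := by
              rw [sub_mul]; omega
            have hq : PySem.Int.floordiv ((t.2.1 - mjB) * s + dj) s = t.2.1 - mjB :=
              (PySem.Int.floordiv_eq_iff_of_pos hs0).mpr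
                ⟨by omega, by rw [add_mul, one_mul]; omega⟩
            rw [he, hq]
            omega
        · rintro ⟨_, hr1', hc1', hmem⟩
          rw [hcells] at hmem
          obtain ⟨t, ht, ht1, ht2⟩ := hmem
          have hdr := PySem.Int.floordiv_mul_add_mod ((r : Int) - 1) s
          have hdc := PySem.Int.floordiv_mul_add_mod ((c : Int) - 1) s
          have hmr1 := PySem.Int.mod_nonneg ((r : Int) - 1) hs0
          have hmr2 := PySem.Int.mod_lt ((r : Int) - 1) hs0
          have hmc1 := PySem.Int.mod_nonneg ((c : Int) - 1) hs0
          have hmc2 := PySem.Int.mod_lt ((c : Int) - 1) hs0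
          refine ⟨((t.1 * s + PySem.Int.mod ((r : Int) - 1) s) - miB * s + 1,
                   (t.2.1 * s + PySem.Int.mod ((c : Int) - 1) s) - mjB * s + 1, t.2.2), ?_, ?_, ?_⟩
          · rw [hobj]
            exact ⟨(t.1 * s + PySem.Int.mod ((r : Int) - 1) s,
                    t.2.1 * s + PySem.Int.mod ((c : Int) - 1) s, t.2.2),
              (hup _).mpr ⟨t, ht, _, _, hmr1, hmr2, hmc1, hmc2, rfl⟩, rfl⟩
          · simp only
            have he : t.1 * s = PySem.Int.floordiv ((r : Int) - 1) s * s + miB * s := by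
              rw [ht1, add_mul]
            omega
          · simp only
            have he : t.2.1 * s = PySem.Int.floordiv ((c : Int) - 1) s * s + mjB * s := by
              rw [ht2, add_mul]
            omega
      by_cases hcnd : ∃ t ∈ pvObjA small s, t.1 = (r : Int) ∧ t.2.1 = (c : Int)
      · rw [if_pos hcnd, if_pos (hcond.mp hcnd)]
      · rw [if_neg hcnd, if_neg (fun h => hcnd (hcond.mpr h))]
        unfold pvCell
        rw [PySem.List.pyGetD_natCast, PySem.List.pyGetD_natCast]


theorem pvMain (I : List (List Int)) (_hne : I ≠ [])
    (hw : ∀ row ∈ I, (I.headD []).length ≤ row.length)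
    (hclause : pvPos2 I ≠ [] → pvUniqueMax I ∧ (pvHasNonBg I → 3 ≤ pvBoxW I)) :
    solve_6b9890af I = solve_6b9890af_alt I := by
  rcases hpos : pvPos2 I with _ | ⟨p, tl⟩
  · -- no colour-2 cell: both return I
    have hA : solve_6b9890af I = I := by
      unfold solve_6b9890af; rw [hpos]; rfl
    have hB : solve_6b9890af_alt I = I := by
      unfold solve_6b9890af_alt; rw [pvBoxB_eq, hpos]; rfl
    rw [hA, hB]
  · -- the four bounding-box numbers, in the form produced by the fold
    set F1 := tl.foldl (fun (x : Int) (q : Int × Int) => min x q.1) p.1 with hF1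
    set F2 := tl.foldl (fun (x : Int) (q : Int × Int) => max x q.1) p.1 with hF2
    set F3 := tl.foldl (fun (x : Int) (q : Int × Int) => min x q.2) p.2 with hF3
    set F4 := tl.foldl (fun (x : Int) (q : Int × Int) => max x q.2) p.2 with hF4
    have hF1m : F1 = (tl.map (fun q : Int × Int => q.1)).foldl min p.1 := by rw [hF1, List.foldl_map]
    have hF2m : F2 = (tl.map (fun q : Int × Int => q.1)).foldl max p.1 := by rw [hF2, List.foldl_map]
    have hF3m : F3 = (tl.map (fun q : Int × Int => q.2)).foldl min p.2 := by rw [hF3, List.foldl_map]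
    have hF4m : F4 = (tl.map (fun q : Int × Int => q.2)).foldl max p.2 := by rw [hF4, List.foldl_map]
    -- A's four min/max expressions equal them
    have hi0 : (PySem.List.min? ((p :: tl).map (fun q => q.1)) (fun x => x)).getD 0 = F1 := by
      rw [List.map_cons, PySem.List.min?_id_cons, Option.getD_some, ← hF1m]
    have hi1 : (PySem.List.max? ((p :: tl).map (fun q => q.1)) (fun x => x)).getD 0 = F2 := by
      rw [List.map_cons, PySem.List.max?_id_cons, Option.getD_some, ← hF2m]
    have hj0 : (PySem.List.min? ((p :: tl).map (fun q => q.2)) (fun x => x)).getD 0 = F3 := by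
      rw [List.map_cons, PySem.List.min?_id_cons, Option.getD_some, ← hF3m]
    have hj1 : (PySem.List.max? ((p :: tl).map (fun q => q.2)) (fun x => x)).getD 0 = F4 := by
      rw [List.map_cons, PySem.List.max?_id_cons, Option.getD_some, ← hF4m]
    -- bounds of the box
    have hbounds := pvPos2_bounds I
    rw [hpos] at hbounds
    have hF1b : 0 ≤ F1 ∧ F1 ≤ p.1 := by
      rcases (hF1m ▸ PySem.List.foldl_min_mem (tl.map (fun q : Int × Int => q.1)) p.1) with h | h
      · exact ⟨h ▸ (hbounds p List.mem_cons_self).1, h.le⟩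
      · obtain ⟨q, hq, hqe⟩ := List.mem_map.mp (hF1m ▸ h)
        have he : F1 = q.1 := by rw [hF1m, ← hqe]
        exact ⟨he ▸ (hbounds q (List.mem_cons_of_mem _ hq)).1,
          (hF1m ▸ PySem.List.foldl_min_le (tl.map (fun q : Int × Int => q.1)) p.1).1⟩
    have hF2b : p.1 ≤ F2 ∧ F2 < (I.length : Int) := by
      refine ⟨(hF2m ▸ PySem.List.le_foldl_max (tl.map (fun q : Int × Int => q.1)) p.1).1, ?_⟩
      rcases (hF2m ▸ PySem.List.foldl_max_mem (tl.map (fun q : Int × Int => q.1)) p.1) with h | h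
      · exact h ▸ (hbounds p List.mem_cons_self).2.1
      · obtain ⟨q, hq, hqe⟩ := List.mem_map.mp (hF2m ▸ h)
        have he : F2 = q.1 := by rw [hF2m, ← hqe]
        exact he ▸ (hbounds q (List.mem_cons_of_mem _ hq)).2.1
    have hF3b : 0 ≤ F3 ∧ F3 ≤ p.2 := by
      rcases (hF3m ▸ PySem.List.foldl_min_mem (tl.map (fun q : Int × Int => q.2)) p.2) with h | h
      · exact ⟨h ▸ (hbounds p List.mem_cons_self).2.2.1, h.le⟩
      · obtain ⟨q, hq, hqe⟩ := List.mem_map.mp (hF3m ▸ h)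
        have he : F3 = q.2 := by rw [hF3m, ← hqe]
        exact ⟨he ▸ (hbounds q (List.mem_cons_of_mem _ hq)).2.2.1,
          (hF3m ▸ PySem.List.foldl_min_le (tl.map (fun q : Int × Int => q.2)) p.2).1⟩
    have hF4b : p.2 ≤ F4 ∧ F4 < ((I.headD []).length : Int) := by
      refine ⟨(hF4m ▸ PySem.List.le_foldl_max (tl.map (fun q : Int × Int => q.2)) p.2).1, ?_⟩
      rcases (hF4m ▸ PySem.List.foldl_max_mem (tl.map (fun q : Int × Int => q.2)) p.2) with h | h
      · exact h ▸ (hbounds p List.mem_cons_self).2.2.2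
      · obtain ⟨q, hq, hqe⟩ := List.mem_map.mp (hF4m ▸ h)
        have he : F4 = q.2 := by rw [hF4m, ← hqe]
        exact he ▸ (hbounds q (List.mem_cons_of_mem _ hq)).2.2.2
    -- background colours agree (unique most-frequent colour)
    have hne2 : pvPos2 I ≠ [] := by rw [hpos]; simp
    obtain ⟨⟨m, hm1, hm2⟩, hwidth⟩ := hclause hne2
    have hbg : pvBgB I = pvBgA I := by
      rw [pvBgA_eq hm1 hm2, pvBgB_eq hm1 hm2]
    -- both sides, reduced to their box branch
    have hAv : solve_6b9890af I =
        (if (pvComponents I (pvBgA I)).isEmpty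
         then pvSubA I ((PySem.List.min? ((p :: tl).map (fun q => q.1)) (fun x => x)).getD 0)
                      ((PySem.List.max? ((p :: tl).map (fun q => q.1)) (fun x => x)).getD 0)
                      ((PySem.List.min? ((p :: tl).map (fun q => q.2)) (fun x => x)).getD 0)
                      ((PySem.List.max? ((p :: tl).map (fun q => q.2)) (fun x => x)).getD 0)
         else
           let sub := pvSubA I ((PySem.List.min? ((p :: tl).map (fun q => q.1)) (fun x => x)).getD 0)
                      ((PySem.List.max? ((p :: tl).map (fun q => q.1)) (fun x => x)).getD 0)
                      ((PySem.List.min? ((p :: tl).map (fun q => q.2)) (fun x => x)).getD 0)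
                      ((PySem.List.max? ((p :: tl).map (fun q => q.2)) (fun x => x)).getD 0)
           (pvObjA ((PySem.List.min? (pvComponents I (pvBgA I)) (fun c => (c.length : Int))).getD [])
               (PySem.Int.floordiv ((sub.headD []).length : Int) 3)).foldl
             (pvPaintStep (sub.length : Int) ((sub.headD []).length : Int)) sub) := by
      unfold solve_6b9890af
      rw [hpos]
      rfl
    have hBv : solve_6b9890af_alt I =
        (if (pvComponents I (pvBgB I)).isEmpty
         then pvSubB I F1 F2 F3 F4
         else pvGridB (pvSubB I F1 F2 F3 F4)
           ((PySem.List.min? (pvComponents I (pvBgB I)) (fun c => (c.length : Int))).getD [])) := by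
      unfold solve_6b9890af_alt
      rw [pvBoxB_eq, hpos, List.foldl_cons,
        show pvBStep none p = some (p.1, p.1, p.2, p.2) from rfl, pvBoxFold]
    rw [hAv, hBv, hbg, hi0, hi1, hj0, hj1,
      pvSubEq I F1 F2 F3 F4 hF1b.1 (by omega) (by omega)]
    by_cases hcomp : (pvComponents I (pvBgA I)).isEmpty
    · rw [if_pos hcomp, if_pos hcomp]
    · rw [if_neg hcomp, if_neg hcomp]
      -- the smallest component
      have hcne : pvComponents I (pvBgA I) ≠ [] := by
        intro h; rw [h] at hcomp; exact hcomp rfl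
      obtain ⟨sm, hsm⟩ : ∃ sm, PySem.List.min? (pvComponents I (pvBgA I))
          (fun c => (c.length : Int)) = some sm := by
        cases h : PySem.List.min? (pvComponents I (pvBgA I)) (fun c => (c.length : Int)) with
        | none => exact absurd ((PySem.List.min?_eq_none_iff _ _).mp h) hcne
        | some sm => exact ⟨sm, rfl⟩
      have hsmem : sm ∈ pvComponents I (pvBgA I) := PySem.List.min?_mem hsm
      obtain ⟨hsmne, hsmcol⟩ := pvComps_forall I (pvBgA I) sm hsmem
      -- a non-background cell exists, so the box is at least 3 wide
      have hnb : pvHasNonBg I := by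
        by_contra hnb
        apply hcne
        apply pvComps_of_all_bg
        intro q hq
        by_contra hqc
        exact hnb ⟨q, hq, hqc⟩
      have hbw : 3 ≤ F4 - F3 + 1 := by
        have := hwidth hnb
        unfold pvBoxW at this
        rw [hpos, hj0, hj1] at this
        omega
      -- shape of the cropped grid
      set sub := pvSubB I F1 F2 F3 F4 with hsubdef
      have hsublen : sub.length = (F2 + 1 - F1).toNat := by
        rw [hsubdef]
        unfold pvSubB
        rw [PySem.List.slice_toNat _ hF1b.1 (by omega), List.length_map, List.length_take,
          List.length_drop]
        omega
      have hrowlen : ∀ row ∈ sub, row.length = (F4 + 1 - F3).toNat := by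
        intro row hrow
        rw [hsubdef] at hrow
        unfold pvSubB at hrow
        obtain ⟨row', hrow', rfl⟩ := List.mem_map.mp hrow
        exact pvSub_shape I F3 F4 hw hF3b.1 (by omega) (by omega) row'
          (PySem.List.mem_of_mem_slice I (some F1) (some (F2 + 1)) hrow')
      have hsubne : sub ≠ [] := by
        intro h
        rw [h] at hsublen
        simp at hsublen
        omega
      have hhead : (sub.headD []).length = (F4 + 1 - F3).toNat := by
        obtain ⟨r0, rs, hcons⟩ := List.exists_cons_of_ne_nil hsubne
        rw [hcons]
        exact hrowlen r0 (by rw [hcons]; exact List.mem_cons_self)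
      have hrows : ∀ r : Nat, r < sub.length → ((sub.getD r []).length) = (sub.headD []).length := by
        intro r hr
        rw [List.getD_eq_getElem _ _ hr, hhead]
        exact hrowlen _ (List.getElem_mem hr)
      have hW3 : 3 ≤ (sub.headD []).length := by
        rw [hhead]; omega
      simp only [hsm, Option.getD_some]
      exact pvPaintEq sub sm hsmne hsmcol hrows hW3

-- ===== VERDICT (by name: the statement is the Claim_ definition above) =====
theorem solve_6b9890af_spec : Claim_equal_solve_6b9890af := by
  intro I _ hpre
  obtain ⟨h1, h2, h3⟩ := hpre
  exact pvMain I h1 h2 h3
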